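-- pv_equiv track=rewrite | github.com/Novia-RDI-Seafaring/control-agent | src/control_agent/evals/utils.py | check_list_item_sequence
-- ===== SOURCE A (Python) =====
-- from typing import List, Dict, Any, Optional
--
-- def check_list_item_sequence(list_to_check: List[str], expected_sequence: List[str]) -> bool:
--     """
--     Check if list_to_check contains all items from expected_sequence in the correct order.
--
--     Args:
--         list_to_check: The list to check
--         expected_sequence: The expected sequence of items
--
--     Returns:
--         True if all items are present and in correct order, False otherwise
--     """
--     # Check if all expected items are present
--     missing = [item for item in expected_sequence if item not in list_to_check]
--     if missing:
--         return False
--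
--     # Check order: find each item sequentially in list_to_check
--     current_index = 0
--     for expected_item in expected_sequence:
--         try:
--             found_index = list_to_check.index(expected_item, current_index)
--             current_index = found_index + 1
--         except ValueError:
--             return False
--
--     return True
-- ===== SOURCE B (Python) =====
-- def check_list_item_sequence(list_to_check, expected_sequence):
--     """Single backward pass over list_to_check with a cursor into expected_sequence.
--
--     Subsequence containment is invariant under reversing both lists, so we walk
--     list_to_check from the end, retiring expected_sequence items from the end.
--     """
--     k = len(expected_sequence) - 1
--     for x in reversed(list_to_check):
--         if k >= 0 and expected_sequence[k] == x:
--             k -= 1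
--     return k < 0
-- ===== Notes on version B (the rewrite author's own statement) =====
-- stated objective: faster
-- what changed: Replaces A's O(n*m) membership pre-pass plus repeated list.index scans (looping over expected_sequence) with a single backward pass over list_to_check carrying one integer cursor into expected_sequence; correctness rests on subsequence matching being invariant under reversing both lists.
import Mathlib
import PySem

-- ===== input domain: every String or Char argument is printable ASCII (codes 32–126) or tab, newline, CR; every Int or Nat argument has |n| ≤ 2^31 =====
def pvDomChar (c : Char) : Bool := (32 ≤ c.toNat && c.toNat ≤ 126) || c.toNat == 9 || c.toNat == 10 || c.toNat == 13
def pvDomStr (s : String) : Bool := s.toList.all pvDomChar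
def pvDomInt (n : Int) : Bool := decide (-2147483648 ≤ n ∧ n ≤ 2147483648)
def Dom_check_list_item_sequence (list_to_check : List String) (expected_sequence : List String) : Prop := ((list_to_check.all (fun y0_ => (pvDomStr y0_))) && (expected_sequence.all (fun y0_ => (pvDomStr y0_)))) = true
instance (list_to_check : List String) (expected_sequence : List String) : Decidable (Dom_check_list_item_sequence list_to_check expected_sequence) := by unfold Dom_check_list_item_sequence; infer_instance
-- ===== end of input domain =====

-- B replaces A's membership pre-pass + repeated list.index scans by one backward pass over
-- list_to_check with an integer cursor into expected_sequence (objective: faster).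

-- ===== PORT A =====
-- Port of A: membership pre-pass, then repeated list.index(item, current_index) scans.
-- list.index(x, ci) = first index ≥ ci holding x (ValueError → none)
def pyIndexFrom (l : List String) (x : String) (ci : Nat) : Option Nat :=
  (PySem.List.index? (l.drop ci) x).map (· + ci)

def aLoop (l : List String) (es : List String) (ci : Nat) : Bool :=
  match es with
  | [] => true
  | x :: rest =>
    match pyIndexFrom l x ci with
    | some j => aLoop l rest (j + 1)
    | none => false

def check_list_item_sequence (list_to_check : List String) (expected_sequence : List String) : Bool :=
  let missing := expected_sequence.filter (fun item => !(list_to_check.contains item))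
  if !missing.isEmpty then false
  else aLoop list_to_check expected_sequence 0

-- ===== PORT B =====
-- Port of B: 'for x in reversed(list_to_check): if k >= 0 and expected_sequence[k] == x: k -= 1'
def check_list_item_sequence_alt (list_to_check : List String) (expected_sequence : List String) : Bool :=
  let k := list_to_check.reverse.foldl
    (fun k x => if 0 ≤ k && PySem.List.pyGet? expected_sequence k == some x then k - 1 else k)
    ((expected_sequence.length : Int) - 1)
  decide (k < 0)

-- ===== PRECONDITION & SPEC =====
def Spec_check_list_item_sequence (list_to_check : List String) (expected_sequence : List String) (out : Bool) : Prop := out = check_list_item_sequence_alt list_to_check expected_sequence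
instance (list_to_check : List String) (expected_sequence : List String) (out : Bool) : Decidable (Spec_check_list_item_sequence list_to_check expected_sequence out) := by unfold Spec_check_list_item_sequence; infer_instance

-- ===== CLAIM (what is proved, stated in full; the proofs are below) =====
def Claim_equal_check_list_item_sequence : Prop := ∀ (list_to_check : List String) (expected_sequence : List String), Dom_check_list_item_sequence list_to_check expected_sequence → Spec_check_list_item_sequence list_to_check expected_sequence (check_list_item_sequence list_to_check expected_sequence)

-- ===== LEMMAS AND PROOFS =====

-- A's inner scan: consuming the first occurrence of x characterises sublist extension.
theorem sublist_cons_iff_index (x : String) (rest l : List String) :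
    List.Sublist (x :: rest) l ↔
      ∃ j, PySem.List.index? l x = some j ∧ List.Sublist rest (l.drop (j + 1)) := by
  induction l with
  | nil => simp [PySem.List.index?]
  | cons y ys ih =>
    by_cases h : y = x
    · subst h
      rw [PySem.List.index?_cons_self]
      constructor
      · intro hs
        exact ⟨0, rfl, by simpa using List.cons_sublist_cons.mp hs⟩
      · rintro ⟨j, hj, hrest⟩
        cases hj
        exact List.cons_sublist_cons.mpr (by simpa using hrest)
    · rw [PySem.List.index?_cons_of_ne ys h]
      constructor
      · intro hs
        rcases List.sublist_cons_iff.mp hs with hs' | ⟨r, hr, _⟩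
        · rcases ih.mp hs' with ⟨j, hj, hrest⟩
          exact ⟨j + 1, by rw [hj]; rfl, by simpa using hrest⟩
        · exact absurd (by injection hr with h1 _; exact h1.symm) h
      · rintro ⟨j, hj, hrest⟩
        cases hk : PySem.List.index? ys x with
        | none => rw [hk] at hj; simp at hj
        | some k =>
          rw [hk] at hj
          simp only [Option.map_some, Option.some.injEq] at hj
          subst hj
          exact List.Sublist.cons _ (ih.mpr ⟨k, hk, by simpa using hrest⟩)

theorem aLoop_eq_sublist (l : List String) (es : List String) (ci : Nat) :
    aLoop l es ci = decide (List.Sublist es (l.drop ci)) := by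
  induction es generalizing ci with
  | nil => simp [aLoop]
  | cons x rest ih =>
    simp only [aLoop, pyIndexFrom]
    cases hk : PySem.List.index? (l.drop ci) x with
    | none =>
      have hx : x ∉ l.drop ci := (PySem.List.index?_eq_none_iff _ _).mp hk
      simp only [Option.map_none]
      symm
      simp only [decide_eq_false_iff_not]
      intro hs
      exact hx (hs.subset (List.mem_cons_self ..))
    | some k =>
      simp only [Option.map_some]
      rw [ih (k + ci + 1)]
      have : (l.drop ci).drop (k + 1) = l.drop (k + ci + 1) := by
        rw [List.drop_drop]; congr 1; omega
      rw [← this]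
      have := sublist_cons_iff_index x rest (l.drop ci)
      simp only [hk] at this
      simp only [decide_eq_decide]
      rw [this]
      constructor
      · rintro h; exact ⟨k, rfl, h⟩
      · rintro ⟨j, hj, h⟩; cases hj; exact h

-- B's fold: running cursor k means 'the last k+1 expected items are still unmatched'.
theorem foldB_lt_iff (es : List String) (ls : List String) (k : Int)
    (h1 : -1 ≤ k) (h2 : k < es.length) :
    (ls.foldl
      (fun k x => if 0 ≤ k && PySem.List.pyGet? es k == some x then k - 1 else k) k < 0)
      ↔ List.Sublist (es.take (k + 1).toNat).reverse ls := by
  induction ls generalizing k with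
  | nil =>
    simp only [List.foldl_nil, List.sublist_nil, List.reverse_eq_nil_iff]
    constructor
    · intro hk
      have : k = -1 := by omega
      subst this; simp
    · intro ht
      by_contra hk
      have hk0 : 0 ≤ k := by omega
      have : (k + 1).toNat ≠ 0 := by omega
      have hne : es ≠ [] := by
        intro he; subst he; simp at h2; omega
      rw [List.take_eq_nil_iff] at ht
      tauto
  | cons x xs ih =>
    simp only [List.foldl_cons]
    by_cases hk0 : 0 ≤ k
    · have hlt : k.toNat < es.length := by omega
      have hget : PySem.List.pyGet? es k = some es[k.toNat] := by
        exact PySem.List.pyGet?_eq_some_getElem es hk0 h2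
      have htake : es.take (k + 1).toNat = es.take k.toNat ++ [es[k.toNat]] := by
        have : (k + 1).toNat = k.toNat + 1 := by omega
        rw [this]
        exact List.take_succ_eq_append_getElem hlt
      by_cases hx : es[k.toNat] = x
      · have hcond : (0 ≤ k && PySem.List.pyGet? es k == some x) = true := by
          simp [hk0, hget, hx]
        rw [hcond, if_pos rfl, ih (k - 1) (by omega) (by omega)]
        have : (k - 1 + 1).toNat = k.toNat := by omega
        rw [this, htake]
        simp only [List.reverse_append, List.reverse_cons, List.reverse_nil,
          List.nil_append, List.cons_append]
        rw [hx]
        exact (List.cons_sublist_cons (l₁ := (es.take k.toNat).reverse) (l₂ := xs)).symm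
      · have hcond : (0 ≤ k && PySem.List.pyGet? es k == some x) = false := by
          simp [hget]; intro _; exact fun h => hx h
        rw [hcond, if_neg (by simp), ih k h1 h2, htake]
        simp only [List.reverse_append, List.reverse_cons, List.reverse_nil,
          List.nil_append, List.cons_append]
        rw [List.sublist_cons_iff]
        constructor
        · intro h; exact Or.inl h
        · rintro (h | ⟨r, hr, _⟩)
          · exact h
          · exfalso; cases hr; exact hx rfl
    · have hk1 : k = -1 := by omega
      subst hk1
      simp only [show ((0:Int) ≤ -1 && PySem.List.pyGet? es (-1) == some x) = false by simp]
      rw [if_neg (by simp), ih (-1) (by omega) h2]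
      simp

theorem alt_eq_sublist (l es : List String) :
    check_list_item_sequence_alt l es = decide (List.Sublist es l) := by
  unfold check_list_item_sequence_alt
  simp only
  rw [decide_eq_decide]
  rw [foldB_lt_iff es l.reverse ((es.length : Int) - 1) (by omega) (by omega)]
  have : ((es.length : Int) - 1 + 1).toNat = es.length := by omega
  rw [this, List.take_length, List.reverse_sublist]

theorem check_list_item_sequence_spec : Claim_equal_check_list_item_sequence := by
  intro l es _
  unfold Spec_check_list_item_sequence check_list_item_sequence
  rw [alt_eq_sublist]
  simp only
  split
  · rename_i h
    have : ∃ x ∈ es, x ∉ l := by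
      simp only [Bool.not_eq_eq_eq_not, Bool.not_true, List.isEmpty_eq_false_iff] at h
      rcases List.exists_mem_of_ne_nil _ h with ⟨x, hx⟩
      have := List.mem_filter.mp hx
      exact ⟨x, this.1, by simpa using this.2⟩
    symm
    simp only [decide_eq_false_iff_not]
    rintro hs
    rcases this with ⟨x, hx, hxl⟩
    exact hxl (hs.subset hx)
  · rw [aLoop_eq_sublist l es 0]
    simp
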